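-- pv_equiv track=rewrite | github.com/milowullink/UniversityofTwente | session3/exercises4.py | multiples
-- ===== SOURCE A (Python) =====
-- def multiples(t,n):
--     S = set()
--     k = len(t)
--     for j in range(n+1):
--         for i in range(k):
--             if j % t[i] == 0:
--                 S.add(j)
--     return S
-- ===== SOURCE B (Python) =====
-- def multiples(t, n):
--     # Sieve: mark every multiple of each divisor once, then collect the marks.
--     if n < 0:
--         return set()
--     sieve = [False] * (n + 1)
--     for d in t:
--         for j in range(0, n + 1, abs(d)):
--             sieve[j] = True
--     return {j for j in range(n + 1) if sieve[j]}
-- ===== Notes on version B (the rewrite author's own statement) =====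
-- stated objective: faster
-- what changed: Instead of testing every j in 0..n against every divisor (trial division), B marks a boolean sieve by stepping through the multiples of each divisor with range(0, n+1, abs(d)) and then collects the marked indices.
import Mathlib
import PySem

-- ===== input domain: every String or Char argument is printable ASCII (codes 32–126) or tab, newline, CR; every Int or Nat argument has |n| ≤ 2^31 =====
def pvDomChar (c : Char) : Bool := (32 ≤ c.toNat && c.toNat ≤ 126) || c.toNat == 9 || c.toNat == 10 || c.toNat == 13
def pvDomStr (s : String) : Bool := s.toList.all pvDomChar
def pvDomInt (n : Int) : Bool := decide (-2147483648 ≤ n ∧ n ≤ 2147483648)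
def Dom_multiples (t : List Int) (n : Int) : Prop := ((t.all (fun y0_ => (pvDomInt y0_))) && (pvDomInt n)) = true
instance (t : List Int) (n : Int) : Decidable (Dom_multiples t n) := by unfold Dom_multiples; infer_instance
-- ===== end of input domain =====

-- B replaces A's per-element trial division by a boolean sieve over the multiples of each divisor (faster).


-- ===== PORT A =====
def multiples (t : List Int) (n : Int) : List Int :=
  (PySem.List.pyRange 0 (n+1) 1).foldl (fun S j =>
    (PySem.List.pyRange 0 (t.length : Int) 1).foldl (fun S i =>
      if PySem.Int.mod j (PySem.List.pyGetD t i 0) = 0 then PySem.Set.add S j else S) S)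
    PySem.Set.empty

-- ===== PORT B =====
-- the two marking loops of Source B ('for d in t: for j in range(0, n+1, abs(d)): sieve[j] = True')
def sieveOf (t : List Int) (n : Int) : List Bool :=
  t.foldl (fun sv d =>
      (PySem.List.pyRange 0 (n+1) (d.natAbs : Int)).foldl
        (fun sv j => sv.set j.toNat true) sv)
    (List.replicate (n+1).toNat false)

def multiples_alt (t : List Int) (n : Int) : List Int :=
  if n < 0 then PySem.Set.empty
  else
    let sieve : List Bool := sieveOf t n
    (PySem.List.pyRange 0 (n+1) 1).foldl
      (fun S j => if sieve.getD j.toNat false then PySem.Set.add S j else S)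
      PySem.Set.empty

-- ===== PRECONDITION & SPEC =====
-- Pre_ excludes exactly the inputs where both programs raise: when n ≥ 0 and 0 ∈ t,
-- A raises ZeroDivisionError (j % 0) and B raises ValueError (range step 0).
def Pre_multiples (t : List Int) (n : Int) : Prop := 0 ∉ t ∨ n < 0
instance (t : List Int) (n : Int) : Decidable (Pre_multiples t n) := by unfold Pre_multiples; infer_instance
def pvWitness_multiples : List Int × Int := ([2, -3], 10)

def Spec_multiples (t : List Int) (n : Int) (out : List Int) : Prop := out = multiples_alt t n
instance (t : List Int) (n : Int) (out : List Int) : Decidable (Spec_multiples t n out) := by unfold Spec_multiples; infer_instance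

-- ===== CLAIM (what is proved, stated in full; the proofs are below) =====
def Claim_equal_multiples : Prop := ∀ (t : List Int) (n : Int), Dom_multiples t n → Pre_multiples t n → Spec_multiples t n (multiples t n)

-- ===== LEMMAS AND PROOFS =====

-- A's inner loop over the divisors: j gets added iff some divisor passes the test.
theorem foldl_add_if_any {t : List Int} (j : Int) (S : PySem.Set Int) :
    t.foldl (fun S d => if PySem.Int.mod j d = 0 then PySem.Set.add S j else S) S =
      if t.any (fun d => decide (PySem.Int.mod j d = 0)) then PySem.Set.add S j else S := by
  induction t generalizing S with
  | nil => simp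
  | cons d t ih =>
    simp only [List.foldl_cons, List.any_cons]
    by_cases h : PySem.Int.mod j d = 0
    · rw [if_pos h, ih]
      by_cases h2 : (t.any fun d => decide (PySem.Int.mod j d = 0)) = true
      · simp [h, h2]
      · simp [h, h2]
    · rw [if_neg h, ih]
      simp [h]

-- Conditionally adding the elements of a Nodup list disjoint from the accumulator appends its filter.
theorem foldl_add_filter (p : Int → Bool) (l : List Int) (S : PySem.Set Int)
    (hnd : l.Nodup) (hdisj : ∀ x ∈ S, x ∉ l) :
    l.foldl (fun S j => if p j then PySem.Set.add S j else S) S = S ++ l.filter p := by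
  induction l generalizing S with
  | nil => simp
  | cons j l ih =>
    simp only [List.foldl_cons, List.filter_cons]
    have hjS : j ∉ S := fun h => (hdisj j h) (List.mem_cons_self ..)
    have hadd : PySem.Set.add S j = S ++ [j] := by
      simp [PySem.Set.add, hjS]
    have hnd' : l.Nodup := (List.nodup_cons.mp hnd).2
    by_cases hp : p j
    · rw [hp]
      simp only [if_true]
      rw [ih _ hnd' (by
        intro x hx
        rcases List.mem_append.mp (hadd ▸ hx) with h | h
        · exact fun hl => (hdisj x h) (List.mem_cons_of_mem _ hl)
        · simp at h; subst h; exact (List.nodup_cons.mp hnd).1), hadd]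
      simp
    · simp only [hp, if_false, Bool.false_eq_true]
      rw [ih _ hnd' (fun x hx hl => (hdisj x hx) (List.mem_cons_of_mem _ hl))]

-- Marking a list of nonnegative in-range indices in a boolean array.
theorem getD_foldl_set (L : List Int) (sv : List Bool) (k : Nat)
    (hL : ∀ j ∈ L, 0 ≤ j ∧ j.toNat < sv.length) :
    ((L.foldl (fun sv j => sv.set j.toNat true) sv).getD k false = true) ↔
      (sv.getD k false = true ∨ ∃ j ∈ L, j.toNat = k) := by
  induction L generalizing sv with
  | nil => simp
  | cons j L ih =>
    simp only [List.foldl_cons]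
    rw [ih _ (by intro x hx; have := hL x (List.mem_cons_of_mem _ hx); simpa [List.length_set] using this)]
    have hj := hL j (List.mem_cons_self ..)
    by_cases hk : j.toNat = k
    · subst hk
      constructor
      · intro _; right; exact ⟨j, List.mem_cons_self .., rfl⟩
      · intro _; left
        rw [List.getD_eq_getElem?_getD, List.getElem?_set_self (show j.toNat < sv.length by omega)]
        rfl
    · constructor
      · rintro (h | ⟨x, hx, rfl⟩)
        · rw [List.getD_eq_getElem?_getD, List.getElem?_set_ne hk] at h
          left; rwa [List.getD_eq_getElem?_getD]
        · right; exact ⟨x, List.mem_cons_of_mem _ hx, rfl⟩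
      · rintro (h | ⟨x, hx, rfl⟩)
        · left; rw [List.getD_eq_getElem?_getD, List.getElem?_set_ne hk]
          rwa [List.getD_eq_getElem?_getD] at h
        · rcases List.mem_cons.mp hx with rfl | hx
          · left
            rw [List.getD_eq_getElem?_getD, List.getElem?_set_self (show x.toNat < sv.length by omega)]
            rfl
          · right; exact ⟨x, hx, rfl⟩

-- Length is preserved by the sieve-marking folds.
theorem length_foldl_set (L : List Int) (sv : List Bool) :
    (L.foldl (fun sv j => sv.set j.toNat true) sv).length = sv.length := by
  induction L generalizing sv with
  | nil => rfl
  | cons j L ih => simp [List.foldl_cons, ih, List.length_set]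

-- The sieve built by B holds true at k < n+1 iff some divisor divides k.
theorem sieve_spec (t : List Int) (n : Int) (ht : 0 ∉ t) (sv : List Bool)
    (hlen : sv.length = (n+1).toNat) (k : Nat) (hk : (k : Int) < n + 1) :
    ((t.foldl (fun sv d =>
        (PySem.List.pyRange 0 (n+1) (d.natAbs : Int)).foldl
          (fun sv j => sv.set j.toNat true) sv) sv).getD k false = true) ↔
      (sv.getD k false = true ∨ ∃ d ∈ t, d ∣ (k : Int)) := by
  induction t generalizing sv with
  | nil => simp
  | cons d t ih =>
    have hd : d ≠ 0 := fun h => ht (h ▸ List.mem_cons_self ..)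
    have hpos : (0:Int) < (d.natAbs : Int) := by
      have := Int.natAbs_pos.mpr hd; exact_mod_cast this
    simp only [List.foldl_cons]
    rw [ih (fun h => ht (List.mem_cons_of_mem _ h)) _
      (by rw [length_foldl_set]; exact hlen)]
    rw [getD_foldl_set _ _ _ (by
      intro j hj
      rw [PySem.List.mem_pyRange_iff_of_pos hpos] at hj
      exact ⟨hj.1, by rw [hlen]; omega⟩)]
    constructor
    · rintro ((h | ⟨j, hj, rfl⟩) | h)
      · exact Or.inl h
      · rw [PySem.List.mem_pyRange_iff_of_pos hpos] at hj
        right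
        exact ⟨d, List.mem_cons_self .., by
          have : (j.toNat : Int) = j := by omega
          rw [this]
          exact Int.natAbs_dvd.mp (by simpa using hj.2.2)⟩
      · rcases h with ⟨e, he, hdvd⟩
        exact Or.inr ⟨e, List.mem_cons_of_mem _ he, hdvd⟩
    · rintro (h | ⟨e, he, hdvd⟩)
      · exact Or.inl (Or.inl h)
      · rcases List.mem_cons.mp he with rfl | he
        · left; right
          refine ⟨(k : Int), ?_, by simp⟩
          rw [PySem.List.mem_pyRange_iff_of_pos hpos]
          exact ⟨by omega, hk, by simpa using Int.natAbs_dvd.mpr hdvd⟩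
        · exact Or.inr ⟨e, he, hdvd⟩

-- ===== VERDICT (by name: the statement is the Claim_ definition above) =====
theorem multiples_spec : Claim_equal_multiples := by
  intro t n _ hpre
  unfold Spec_multiples multiples multiples_alt
  by_cases hn : n < 0
  · rw [if_pos hn,
      show PySem.List.pyRange 0 (n+1) 1 = [] from PySem.List.pyRange_one_eq_nil (by omega)]
    rfl
  · rw [if_neg hn]
    have ht : 0 ∉ t := by
      rcases hpre with h | h
      · exact h
      · exact absurd h hn
    -- rewrite A's inner index loop as a loop over t itself
    have hA : ∀ (S : PySem.Set Int) (j : Int),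
        (PySem.List.pyRange 0 (t.length : Int) 1).foldl (fun S i =>
          if PySem.Int.mod j (PySem.List.pyGetD t i 0) = 0 then PySem.Set.add S j else S) S =
        if t.any (fun d => decide (PySem.Int.mod j d = 0)) then PySem.Set.add S j else S := by
      intro S j
      rw [PySem.List.foldl_pyRange_zero_pyGetD' t 0
        (fun S d => if PySem.Int.mod j d = 0 then PySem.Set.add S j else S) S]
      exact foldl_add_if_any j S
    have h1 : (PySem.List.pyRange 0 (n+1) 1).foldl (fun S j =>
        (PySem.List.pyRange 0 (t.length : Int) 1).foldl (fun S i =>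
          if PySem.Int.mod j (PySem.List.pyGetD t i 0) = 0 then PySem.Set.add S j else S) S)
        PySem.Set.empty
        = (PySem.List.pyRange 0 (n+1) 1).foldl (fun S j =>
            if t.any (fun d => decide (PySem.Int.mod j d = 0)) then PySem.Set.add S j else S)
          PySem.Set.empty :=
      PySem.List.foldl_congr_mem _ _ _ _ (fun S j _ => hA S j)
    show _ = (PySem.List.pyRange 0 (n+1) 1).foldl
      (fun S j => if (sieveOf t n).getD j.toNat false then PySem.Set.add S j else S)
      PySem.Set.empty
    rw [h1]
    rw [foldl_add_filter _ _ _ (PySem.List.nodup_pyRange_one 0 (n+1)) (by simp [PySem.Set.empty])]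
    rw [foldl_add_filter _ _ _ (PySem.List.nodup_pyRange_one 0 (n+1)) (by simp [PySem.Set.empty])]
    simp only [PySem.Set.empty, List.nil_append]
    apply List.filter_congr
    intro j hj
    rw [PySem.List.mem_pyRange_one] at hj
    have hget := sieve_spec t n ht (List.replicate (n+1).toNat false) (by simp) j.toNat
      (by omega)
    have hjt : ((j.toNat : Int)) = j := by omega
    rw [hjt] at hget
    have hrep : (List.replicate (n+1).toNat false).getD j.toNat false = false := by
      simp [List.getD_eq_getElem?_getD]
    rw [hrep] at hget
    rw [iff_iff_implies_and_implies] at hget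
    obtain ⟨hget1, hget2⟩ := hget
    have hget : ((sieveOf t n).getD j.toNat false = true) ↔ (∃ d ∈ t, d ∣ j) := by
      unfold sieveOf
      constructor
      · intro h; rcases hget1 h with h | h
        · exact absurd h (by simp)
        · exact h
      · intro h; exact hget2 (Or.inr h)
    by_cases hq : ∃ d ∈ t, d ∣ j
    · have h2 : (sieveOf t n).getD j.toNat false = true := hget.mpr hq
      rw [h2]
      rcases hq with ⟨d, hd, hdvd⟩
      exact (List.any_eq_true).mpr ⟨d, hd, by simpa [PySem.Int.mod_eq_zero_iff_dvd]⟩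
    · have h2 : (sieveOf t n).getD j.toNat false = false := by
        by_contra hc
        simp only [Bool.not_eq_false] at hc
        exact hq (hget.mp hc)
      rw [h2, List.any_eq_false]
      intro d hd
      simp only [decide_eq_true_eq]
      exact fun hmod => hq ⟨d, hd, (PySem.Int.mod_eq_zero_iff_dvd _ _).mp hmod⟩
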